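-- pv_equiv track=rewrite | github.com/tupkalenkodi/DONE | 2023/stepping.py | make_bound
-- ===== SOURCE A (Python) =====
-- def make_bound(l):
--     x = []
--     m = 0
--     for c in l:
--         if abs(c) > m:
--             m = abs(c)
--         x.append(m)
--     return x
-- ===== SOURCE B (Python) =====
-- def make_bound(l):
--     if not l:
--         return []
--
--     def rec(seg):
--         if len(seg) == 1:
--             return [abs(seg[0])]
--         mid = len(seg) // 2
--         left = rec(seg[:mid])
--         right = rec(seg[mid:])
--         lm = left[-1]
--         return left + [lm if lm > r else r for r in right]
--
--     return rec(l)
-- ===== Notes on version B (the rewrite author's own statement) =====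
-- stated objective: alternative
-- what changed: Replaces A's single left-to-right accumulator loop by a divide-and-conquer recursion: split the list in half, recursively compute each half's prefix maxima of absolute values, then lift the right half by the left half's last (maximal) value; correct because prefix maxima of a concatenation are the left prefix maxima followed by the right prefix maxima clamped below by the left total maximum.
import Mathlib
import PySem

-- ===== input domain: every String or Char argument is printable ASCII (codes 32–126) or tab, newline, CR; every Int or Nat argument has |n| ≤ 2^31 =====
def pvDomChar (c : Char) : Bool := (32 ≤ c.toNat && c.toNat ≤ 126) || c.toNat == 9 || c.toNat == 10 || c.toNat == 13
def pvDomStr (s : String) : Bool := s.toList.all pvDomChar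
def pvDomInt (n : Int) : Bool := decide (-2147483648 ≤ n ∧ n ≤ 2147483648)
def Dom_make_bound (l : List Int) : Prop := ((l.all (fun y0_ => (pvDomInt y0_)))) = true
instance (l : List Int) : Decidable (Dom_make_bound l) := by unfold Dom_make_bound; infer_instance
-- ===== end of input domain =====

-- B replaces A's accumulator loop by a divide-and-conquer recursion (alternative decomposition, same result).

-- ===== PORT A =====
-- literal port of A: state (x, m); for each c, bump m to abs(c) if larger, append m
def make_bound (l : List Int) : List Int :=
  (l.foldl (fun (s : List Int × Int) c =>
      let m := if |c| > s.2 then |c| else s.2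
      (s.1 ++ [m], m)) ([], 0)).1

-- ===== PORT B =====
-- port of Source B's inner rec: if len(seg)==1: [abs(seg[0])]; else split at mid=len//2, recurse, merge.
-- Python's rec is never called with an empty segment; the final 'else []' branch only makes the Lean recursion total.
def mbRec (seg : List Int) : List Int :=
  if seg.length = 1 then
    [|PySem.List.pyGetD seg 0 0|]
  else if _h2 : 2 ≤ seg.length then
    let mid : Int := PySem.Int.floordiv (seg.length : Int) 2
    let left := mbRec (PySem.List.slice seg none (some mid))
    let right := mbRec (PySem.List.slice seg (some mid) none)
    let lm := PySem.List.pyGetD left (-1) 0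
    left ++ right.map (fun r => if lm > r then lm else r)
  else []
termination_by seg.length
decreasing_by
  · have hm : PySem.Int.floordiv (seg.length : Int) 2 = ((seg.length / 2 : Nat) : Int) := by
      exact_mod_cast PySem.Int.floordiv_natCast seg.length 2
    rw [hm, PySem.List.slice_to_natCast]
    simp only [List.length_take]
    omega
  · have hm : PySem.Int.floordiv (seg.length : Int) 2 = ((seg.length / 2 : Nat) : Int) := by
      exact_mod_cast PySem.Int.floordiv_natCast seg.length 2
    rw [hm, PySem.List.slice_from_natCast]
    simp only [List.length_drop]
    omega

-- port of Source B's make_bound: 'if not l: return []' then rec(l)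
def make_bound_alt (l : List Int) : List Int :=
  if l = [] then [] else mbRec l

-- ===== PRECONDITION & SPEC =====
def Spec_make_bound (l : List Int) (out : List Int) : Prop := out = make_bound_alt l
instance (l : List Int) (out : List Int) : Decidable (Spec_make_bound l out) := by unfold Spec_make_bound; infer_instance

-- ===== CLAIM (what is proved, stated in full; the proofs are below) =====
def Claim_equal_make_bound : Prop := ∀ (l : List Int), Dom_make_bound l → Spec_make_bound l (make_bound l)

-- ===== LEMMAS AND PROOFS =====

-- common characterisation: prefix maxima of a list, seeded with m
def pvPmax (m : Int) : List Int → List Int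
  | [] => []
  | a :: t => max m a :: pvPmax (max m a) t

lemma pvPmax_ne_nil (m : Int) (xs : List Int) (h : xs ≠ []) : pvPmax m xs ≠ [] := by
  cases xs with
  | nil => exact absurd rfl h
  | cons a t => simp [pvPmax]

lemma pvA_inv (l : List Int) : ∀ (acc : List Int) (m : Int),
    (l.foldl (fun (s : List Int × Int) c =>
      let m := if |c| > s.2 then |c| else s.2
      (s.1 ++ [m], m)) (acc, m)).1 = acc ++ pvPmax m (l.map (fun c => |c|)) := by
  induction l with
  | nil => intro acc m; simp [pvPmax]
  | cons c t ih =>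
    intro acc m
    have h : (if |c| > m then |c| else m) = max m |c| := by omega
    simp only [List.foldl_cons, List.map_cons, pvPmax, h, ih]
    simp

lemma pvPmax_map_max (b : Int) (xs : List Int) : ∀ m,
    (pvPmax m xs).map (fun r => if b > r then b else r) = pvPmax (max b m) xs := by
  induction xs with
  | nil => intro m; simp [pvPmax]
  | cons a t ih =>
    intro m
    simp only [pvPmax, List.map_cons, ih (max m a)]
    rw [max_assoc]
    congr 1
    omega

lemma pvPmax_append (xs ys : List Int) : ∀ m,
    pvPmax m (xs ++ ys) = pvPmax m xs ++ pvPmax (xs.foldl max m) ys := by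
  induction xs with
  | nil => intro m; simp [pvPmax]
  | cons a t ih => intro m; simp [pvPmax, ih]

lemma pvPmax_last? (xs : List Int) : ∀ m, xs ≠ [] →
    (pvPmax m xs).getLast? = some (xs.foldl max m) := by
  induction xs with
  | nil => intro m h; exact absurd rfl h
  | cons a t ih =>
    intro m _
    cases t with
    | nil => simp [pvPmax]
    | cons b u =>
      rw [show pvPmax m (a :: b :: u)
            = max m a :: max (max m a) b :: pvPmax (max (max m a) b) u from rfl]
      rw [List.getLast?_cons_cons]
      have h2 := ih (max m a) (by simp)
      rw [show pvPmax (max m a) (b :: u)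
            = max (max m a) b :: pvPmax (max (max m a) b) u from rfl] at h2
      rw [h2]
      simp

lemma pv_foldl_max_nonneg (xs : List Int) : ∀ m, m ≤ xs.foldl max m := by
  induction xs with
  | nil => intro m; simp
  | cons a t ih => intro m; exact le_trans (le_max_left m a) (ih (max m a))

lemma pvB_rec (n : Nat) : ∀ (seg : List Int), seg.length ≤ n → seg ≠ [] →
    mbRec seg = pvPmax 0 (seg.map (fun c => |c|)) := by
  induction n with
  | zero => intro seg hle hne; cases seg with
    | nil => exact absurd rfl hne
    | cons a t => simp only [List.length_cons] at hle; omega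
  | succ n ih =>
    intro seg hle hne
    by_cases h1 : seg.length = 1
    · cases seg with
      | nil => exact absurd rfl hne
      | cons a t =>
        cases t with
        | nil => simp [mbRec, pvPmax, PySem.List.pyGetD_zero_cons, abs_nonneg]
        | cons b u => simp at h1
    · have h2 : 2 ≤ seg.length := by
        cases seg with
        | nil => exact absurd rfl hne
        | cons a t => simp only [List.length_cons] at h1 ⊢; omega
      have hm : PySem.Int.floordiv (seg.length : Int) 2 = ((seg.length / 2 : Nat) : Int) := by
        exact_mod_cast PySem.Int.floordiv_natCast seg.length 2
      rw [mbRec, if_neg h1, dif_pos h2]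
      simp only [hm, PySem.List.slice_to_natCast, PySem.List.slice_from_natCast]
      obtain ⟨k, hk⟩ : ∃ k, seg.length / 2 = k := ⟨_, rfl⟩
      rw [hk]
      have hkpos : 1 ≤ k := by omega
      have hklt : k < seg.length := by omega
      have htake_ne : seg.take k ≠ [] := by
        intro h; have h0 := congrArg List.length h
        rw [List.length_take] at h0; simp only [List.length_nil] at h0; omega
      have hdrop_ne : seg.drop k ≠ [] := by
        intro h; have h0 := congrArg List.length h
        rw [List.length_drop] at h0; simp only [List.length_nil] at h0; omega
      have hL := ih (seg.take k) (by rw [List.length_take]; omega) htake_ne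
      have hR := ih (seg.drop k) (by rw [List.length_drop]; omega) hdrop_ne
      rw [hL, hR]
      have hmapne : (seg.take k).map (fun c => |c|) ≠ [] :=
        fun h => htake_ne (List.map_eq_nil_iff.mp h)
      have hlast : PySem.List.pyGetD (pvPmax 0 ((seg.take k).map (fun c => |c|))) (-1) 0
          = ((seg.take k).map (fun c => |c|)).foldl max 0 := by
        rw [PySem.List.pyGetD_neg_one _ _ (pvPmax_ne_nil 0 _ hmapne)]
        have h' := pvPmax_last? ((seg.take k).map (fun c => |c|)) 0 hmapne
        rw [List.getLast?_eq_getLast_of_ne_nil (pvPmax_ne_nil 0 _ hmapne)] at h'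
        exact Option.some.inj h' 
      rw [hlast]
      -- name the left maximum
      obtain ⟨lm, hlm⟩ : ∃ v, ((seg.take k).map (fun c => |c|)).foldl max 0 = v := ⟨_, rfl⟩
      rw [hlm]
      have hlm0 : 0 ≤ lm := hlm ▸ pv_foldl_max_nonneg _ 0
      rw [pvPmax_map_max]
      have : max lm 0 = lm := by omega
      rw [this]
      have hsplit : seg.map (fun c => |c|)
          = (seg.take k).map (fun c => |c|) ++ (seg.drop k).map (fun c => |c|) := by
        rw [← List.map_append, List.take_append_drop]
      rw [hsplit, pvPmax_append, hlm]

-- ===== VERDICT (by name: the statement is the Claim_ definition above) =====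
theorem make_bound_spec : Claim_equal_make_bound := by
  intro l _
  unfold Spec_make_bound make_bound make_bound_alt
  by_cases h : l = []
  · subst h; rfl
  · rw [if_neg h, pvB_rec l.length l le_rfl h, pvA_inv]
    simp
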